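-- pv_equiv track=rewrite | github.com/henktillman/gradpam | tools/vis_gradcam.py | generate_fname
-- ===== SOURCE A (Python) =====
-- def generate_fname(kwargs, order=('image', 'pixel_i', 'pixel_j', 'class_name')):
--     parts = []
--     kwargs = kwargs.copy()
--     for key in order:
--         if key not in kwargs:
--             continue
--         parts.append(f'{key}-{kwargs.pop(key)}')
--     for key in sorted(kwargs):
--         parts.append(f'{key}-{kwargs.pop(key)}')
--     return '-'.join(parts)
-- ===== SOURCE B (Python) =====
-- def generate_fname(kwargs, order=('image', 'pixel_i', 'pixel_j', 'class_name')):
--     rank = {}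
--     for i, k in enumerate(order):
--         rank.setdefault(k, i)
--     inorder = sorted((k for k in kwargs if k in rank), key=lambda k: rank[k])
--     rest = sorted(k for k in kwargs if k not in rank)
--     return '-'.join(f'{k}-{kwargs[k]}' for k in inorder + rest)
-- ===== Notes on version B (the rewrite author's own statement) =====
-- stated objective: idiomatic
-- what changed: A copies the dict and destructively pops keys in two accumulating loops; B never mutates: it builds a first-occurrence rank index over order once, computes the key sequence with two pure sorted/filter passes (rank-ordered priority keys, then the rest alphabetically) and formats everything in a single join.
import Mathlib
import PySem

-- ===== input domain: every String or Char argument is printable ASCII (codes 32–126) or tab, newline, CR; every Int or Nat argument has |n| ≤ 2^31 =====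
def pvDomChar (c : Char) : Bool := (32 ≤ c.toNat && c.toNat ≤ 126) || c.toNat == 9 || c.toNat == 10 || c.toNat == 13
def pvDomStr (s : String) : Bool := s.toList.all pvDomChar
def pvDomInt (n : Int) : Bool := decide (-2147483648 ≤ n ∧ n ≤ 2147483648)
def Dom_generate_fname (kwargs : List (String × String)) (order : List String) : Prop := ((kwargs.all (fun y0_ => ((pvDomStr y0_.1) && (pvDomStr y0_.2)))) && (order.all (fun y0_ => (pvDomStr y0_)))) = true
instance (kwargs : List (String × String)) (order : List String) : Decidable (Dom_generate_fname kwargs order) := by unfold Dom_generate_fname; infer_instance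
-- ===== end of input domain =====

-- B replaces A's two destructive pop-loops by two pure sorted/filter passes over the key set and one formatting join (objective: idiomatic).

-- ===== PORT A =====
-- the shared loop body of A's two loops: 'if key not in kwargs: continue' is exactly 'pop? = none'
-- (in the second loop the key is always present, so the 'none' branch is unreachable there)
def pvStepA (st : List String × PySem.Dict String String) (key : String) :
    List String × PySem.Dict String String :=
  match st.2.pop? key with
  | none => st
  | some (v, d') => (st.1 ++ [key ++ "-" ++ v], d')

def generate_fname (kwargs : List (String × String)) (order : List String) : String :=
  let d := PySem.Dict.ofList kwargs
  let st1 := order.foldl pvStepA ([], d)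
  let st2 := (PySem.List.sorted st1.2.keys (fun k => k) false).foldl pvStepA st1
  PySem.Str.join "-" st2.1

-- ===== PORT B =====
def generate_fname_alt (kwargs : List (String × String)) (order : List String) : String :=
  let d := PySem.Dict.ofList kwargs
  -- rank = {}; for i, k in enumerate(order): rank.setdefault(k, i)
  let rank := (PySem.List.enumerate order 0).foldl (fun r p => r.setdefault p.2 p.1)
      (PySem.Dict.empty : PySem.Dict String Int)
  -- sorted((k for k in kwargs if k in rank), key=lambda k: rank[k]); rank[k] is exact here since k ∈ rank
  let inorder := PySem.List.sorted (d.keys.filter (fun k => rank.contains k))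
      (fun k => rank.getD k 0) false
  -- sorted(k for k in kwargs if k not in rank)
  let rest := PySem.List.sorted (d.keys.filter (fun k => !rank.contains k)) (fun k => k) false
  -- '-'.join(f'{k}-{kwargs[k]}' …); kwargs[k] is exact here since every k is a key of the dict
  PySem.Str.join "-" ((inorder ++ rest).map (fun k => k ++ "-" ++ d.getD k ""))

-- ===== PRECONDITION & SPEC =====
def Spec_generate_fname (kwargs : List (String × String)) (order : List String) (out : String) : Prop := out = generate_fname_alt kwargs order
instance (kwargs : List (String × String)) (order : List String) (out : String) : Decidable (Spec_generate_fname kwargs order out) := by unfold Spec_generate_fname; infer_instance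

-- ===== CLAIM (what is proved, stated in full; the proofs are below) =====
def Claim_equal_generate_fname : Prop := ∀ (kwargs : List (String × String)) (order : List String), Dom_generate_fname kwargs order → Spec_generate_fname kwargs order (generate_fname kwargs order)

-- ===== LEMMAS AND PROOFS =====

-- the keys A's loop pops, in the order it pops them
def traceKeys : List String → PySem.Dict String String → List String
  | [], _ => []
  | k :: ks, d =>
    match d.pop? k with
    | none => traceKeys ks d
    | some (_, d') => k :: traceKeys ks d'

def eraseList (d : PySem.Dict String String) (ks : List String) : PySem.Dict String String :=
  ks.foldl PySem.Dict.erase d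

theorem contains_erase_self (d : PySem.Dict String String) (k : String) :
    (d.erase k).contains k = false := by
  simp [PySem.Dict.erase, PySem.Dict.contains, List.any_filter]

theorem contains_erase_of_ne (d : PySem.Dict String String) (k x : String) (h : x ≠ k) :
    (d.erase k).contains x = d.contains x := by
  simp only [PySem.Dict.erase, PySem.Dict.contains, List.any_filter]
  have hf : (fun p : String × String => !p.1 == k && p.1 == x) = (fun p => p.1 == x) :=
    funext fun p => by by_cases hp : p.1 = x <;> simp [hp, h, beq_iff_eq]
  rw [hf]

theorem find?_filter_ne (l : List (String × String)) (k x : String) (h : x ≠ k) :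
    List.find? (fun p => p.1 == x) (l.filter (fun p => !(p.1 == k))) =
      List.find? (fun p => p.1 == x) l := by
  induction l with
  | nil => rfl
  | cons a l ih =>
    by_cases ha : a.1 = x
    · simp [ha, h]
    · by_cases hk : a.1 = k <;> simp [beq_iff_eq, ha, hk, Ne.symm h, ih]

theorem get?_erase_of_ne (d : PySem.Dict String String) (k x : String) (h : x ≠ k) :
    (d.erase k).get? x = d.get? x := by
  simp [PySem.Dict.erase, PySem.Dict.get?, find?_filter_ne _ _ _ h]

theorem getD_erase_of_ne (d : PySem.Dict String String) (k x : String) (v : String) (h : x ≠ k) :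
    (d.erase k).getD x v = d.getD x v := by
  simp [PySem.Dict.getD_eq_get?_getD, get?_erase_of_ne _ _ _ h]

theorem keys_erase (d : PySem.Dict String String) (k : String) :
    (d.erase k).keys = d.keys.filter (fun x => !(x == k)) := by
  simp [PySem.Dict.erase, PySem.Dict.keys, List.filter_map]
  rfl

theorem erase_of_not_contains (d : PySem.Dict String String) (k : String)
    (h : d.contains k = false) : d.erase k = d := by
  simp [PySem.Dict.contains] at h
  apply PySem.Dict.ext
  simp only [PySem.Dict.erase, List.filter_eq_self]
  intro p hp
  simpa using h p.1 p.2 hp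

theorem contains_false_of_pop_none (d : PySem.Dict String String) (k : String)
    (h : d.pop? k = none) : d.contains k = false := by
  simp [PySem.Dict.pop?] at h
  rw [PySem.Dict.contains_eq_isSome_get?, h]; rfl

theorem pop?_some (d : PySem.Dict String String) (k : String) (v : String)
    (d' : PySem.Dict String String) (h : d.pop? k = some (v, d')) :
    d.get? k = some v ∧ d' = d.erase k ∧ d.contains k = true := by
  simp [PySem.Dict.pop?] at h
  obtain ⟨hg, hd⟩ := h
  exact ⟨hg, hd.symm, by rw [PySem.Dict.contains_eq_isSome_get?, hg]; rfl⟩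

theorem mem_traceKeys (ks : List String) : ∀ (d : PySem.Dict String String) (x : String),
    x ∈ traceKeys ks d → d.contains x = true ∧ x ∈ ks := by
  induction ks with
  | nil => intro d x h; simp [traceKeys] at h
  | cons k ks ih =>
    intro d x h
    cases hp : d.pop? k with
    | none =>
      rw [traceKeys, hp] at h
      obtain ⟨hc, hm⟩ := ih d x h
      exact ⟨hc, List.mem_cons_of_mem _ hm⟩
    | some r =>
      obtain ⟨v, d'⟩ := r
      obtain ⟨hg, hd, hc⟩ := pop?_some d k v d' hp
      rw [traceKeys, hp] at h
      rcases List.mem_cons.mp h with h | h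
      · exact ⟨h ▸ hc, h ▸ List.mem_cons_self⟩
      · obtain ⟨hc', hm⟩ := ih d' x h
        have hxk : x ≠ k := by
          intro he; rw [he, hd, contains_erase_self] at hc'; exact Bool.false_ne_true hc'
        rw [hd, contains_erase_of_ne d k x hxk] at hc'
        exact ⟨hc', List.mem_cons_of_mem _ hm⟩

theorem mem_traceKeys_iff (ks : List String) : ∀ (d : PySem.Dict String String) (x : String),
    x ∈ traceKeys ks d ↔ d.contains x = true ∧ x ∈ ks := by
  induction ks with
  | nil => intro d x; simp [traceKeys]
  | cons k ks ih =>
    intro d x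
    refine ⟨mem_traceKeys _ d x, fun ⟨hc, hm⟩ => ?_⟩
    cases hp : d.pop? k with
    | none =>
      have hck := contains_false_of_pop_none d k hp
      have hxk : x ≠ k := fun he => by rw [he, hck] at hc; simp at hc
      rw [traceKeys, hp]
      exact (ih d x).mpr ⟨hc, (List.mem_cons.mp hm).resolve_left hxk⟩
    | some r =>
      obtain ⟨v, d'⟩ := r
      obtain ⟨hg, hd, _⟩ := pop?_some d k v d' hp
      rw [traceKeys, hp]
      by_cases hxk : x = k
      · exact hxk ▸ List.mem_cons_self
      · refine List.mem_cons_of_mem _ ((ih d' x).mpr ⟨?_, (List.mem_cons.mp hm).resolve_left hxk⟩)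
        rw [hd, contains_erase_of_ne d k x hxk]; exact hc

theorem nodup_traceKeys (ks : List String) : ∀ (d : PySem.Dict String String),
    (traceKeys ks d).Nodup := by
  induction ks with
  | nil => intro d; simp [traceKeys]
  | cons k ks ih =>
    intro d
    cases hp : d.pop? k with
    | none => rw [traceKeys, hp]; exact ih d
    | some r =>
      obtain ⟨v, d'⟩ := r
      obtain ⟨hg, hd, _⟩ := pop?_some d k v d' hp
      rw [traceKeys, hp]
      refine List.nodup_cons.mpr ⟨fun hmem => ?_, ih d'⟩
      have := (mem_traceKeys ks d' k hmem).1
      rw [hd, contains_erase_self] at this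
      exact Bool.false_ne_true this

theorem foldl_stepA (ks : List String) : ∀ (d : PySem.Dict String String) (p : List String),
    ks.foldl pvStepA (p, d) =
      (p ++ (traceKeys ks d).map (fun k => k ++ "-" ++ d.getD k ""), eraseList d ks) := by
  induction ks with
  | nil => intro d p; simp [traceKeys, eraseList]
  | cons k ks ih =>
    intro d p
    cases hp : d.pop? k with
    | none =>
      have hck := contains_false_of_pop_none d k hp
      rw [List.foldl_cons, traceKeys]
      show ks.foldl pvStepA (pvStepA (p, d) k) = _
      rw [show pvStepA (p, d) k = (p, d) by simp [pvStepA, hp], hp, ih d p]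
      simp [eraseList, erase_of_not_contains d k hck]
    | some r =>
      obtain ⟨v, d'⟩ := r
      obtain ⟨hg, hd, _⟩ := pop?_some d k v d' hp
      rw [List.foldl_cons, traceKeys]
      show ks.foldl pvStepA (pvStepA (p, d) k) = _
      rw [show pvStepA (p, d) k = (p ++ [k ++ "-" ++ v], d') by simp [pvStepA, hp], hp,
        ih d' (p ++ [k ++ "-" ++ v])]
      have hv : d.getD k "" = v := PySem.Dict.getD_of_get?_eq_some d "" hg
      simp [eraseList, hd, hv]
      intro j hj
      have hc' := (mem_traceKeys ks (d.erase k) j hj).1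
      have hjk : j ≠ k := fun he => by rw [he, contains_erase_self] at hc'; simp at hc'
      exact getD_erase_of_ne d k j "" hjk

theorem index?_append_of_not_mem (pre t : List String) (x : String) (h : x ∉ pre) :
    PySem.List.index? (pre ++ t) x = (PySem.List.index? t x).map (· + pre.length) := by
  induction pre with
  | nil => rw [List.nil_append]; cases hi : PySem.List.index? t x <;> simp
  | cons a pre ih =>
    have hax : a ≠ x := fun he => h (he ▸ List.mem_cons_self)
    have hx : x ∉ pre := fun hm => h (List.mem_cons_of_mem _ hm)
    rw [List.cons_append, PySem.List.index?_cons_of_ne _ hax, ih hx]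
    cases hi : PySem.List.index? t x
    · simp
    · simp; omega

theorem trace_idx_spec (ks : List String) : ∀ (pre : List String) (d : PySem.Dict String String),
    (∀ x, d.contains x = true → x ∉ pre) →
    (∀ x ∈ traceKeys ks d, pre.length ≤ (PySem.List.index? (pre ++ ks) x).getD 0) ∧
    (traceKeys ks d).Pairwise
      (fun a b => (PySem.List.index? (pre ++ ks) a).getD 0 < (PySem.List.index? (pre ++ ks) b).getD 0) := by
  induction ks with
  | nil => intro pre d h; simp [traceKeys]
  | cons k ks ih =>
    intro pre d h
    have hsplit : pre ++ k :: ks = (pre ++ [k]) ++ ks := by simp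
    cases hp : d.pop? k with
    | none =>
      have hck := contains_false_of_pop_none d k hp
      have h' : ∀ x, d.contains x = true → x ∉ pre ++ [k] := by
        intro x hx
        simp only [List.mem_append, List.mem_singleton]
        rintro (hm | he)
        · exact h x hx hm
        · rw [he, hck] at hx; simp at hx
      obtain ⟨hb, hpw⟩ := ih (pre ++ [k]) d h'
      rw [traceKeys, hp, hsplit]
      refine ⟨fun x hx => ?_, hpw⟩
      have := hb x hx
      simp only [List.length_append, List.length_singleton] at this
      omega
    | some r =>
      obtain ⟨v, d'⟩ := r
      obtain ⟨hg, hd, hc⟩ := pop?_some d k v d' hp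
      have h' : ∀ x, d'.contains x = true → x ∉ pre ++ [k] := by
        intro x hx
        simp only [List.mem_append, List.mem_singleton]
        rintro (hm | he)
        · have hxk : x ≠ k := by
            intro he2; rw [he2, hd, contains_erase_self] at hx; simp at hx
          rw [hd, contains_erase_of_ne d k x hxk] at hx
          exact h x hx hm
        · rw [he, hd, contains_erase_self] at hx; simp at hx
      obtain ⟨hb, hpw⟩ := ih (pre ++ [k]) d' h'
      rw [traceKeys, hp, hsplit]
      have hkidx : (PySem.List.index? ((pre ++ [k]) ++ ks) k).getD 0 = pre.length := by
        rw [show (pre ++ [k]) ++ ks = pre ++ (k :: ks) by simp,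
          index?_append_of_not_mem pre (k :: ks) k (h k hc), PySem.List.index?_cons_self]
        simp
      constructor
      · intro x hx
        rcases List.mem_cons.mp hx with he | hx'
        · rw [he, hkidx]
        · have := hb x hx'
          simp only [List.length_append, List.length_singleton] at this
          omega
      · refine List.pairwise_cons.mpr ⟨fun b hb' => ?_, hpw⟩
        have := hb b hb'
        simp only [List.length_append, List.length_singleton] at this
        rw [hkidx]
        omega

theorem rank_contains (l : List String) : ∀ (s : Int) (r : PySem.Dict String Int) (k : String),
    ((PySem.List.enumerate l s).foldl (fun r p => r.setdefault p.2 p.1) r).contains k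
      = (r.contains k || l.contains k) := by
  induction l with
  | nil => intro s r k; simp [PySem.List.enumerate_nil]
  | cons a l ih =>
    intro s r k
    rw [PySem.List.enumerate_cons, List.foldl_cons]
    show ((PySem.List.enumerate l (s + 1)).foldl (fun r p => r.setdefault p.2 p.1)
      (r.setdefault a s)).contains k = _
    rw [ih]
    have hb : (k == a) = decide (k = a) := by
      by_cases hk : k = a <;> simp [hk]
    by_cases hk : k = a <;>
      simp [PySem.Dict.contains_setdefault, hb, hk]

theorem rank_stable (l : List String) : ∀ (s : Int) (r : PySem.Dict String Int) (k : String),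
    r.contains k = true →
    ((PySem.List.enumerate l s).foldl (fun r p => r.setdefault p.2 p.1) r).get? k = r.get? k := by
  induction l with
  | nil => intro s r k _; simp [PySem.List.enumerate_nil]
  | cons a l ih =>
    intro s r k hc
    rw [PySem.List.enumerate_cons, List.foldl_cons]
    show ((PySem.List.enumerate l (s + 1)).foldl (fun r p => r.setdefault p.2 p.1)
      (r.setdefault a s)).get? k = _
    have hc' : (r.setdefault a s).contains k = true := by
      rw [PySem.Dict.contains_setdefault]; simp [hc]
    rw [ih (s + 1) _ k hc']
    by_cases hk : k = a
    · subst hk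
      obtain ⟨w, hw⟩ : ∃ w, r.get? k = some w := by
        rw [PySem.Dict.contains_eq_isSome_get?] at hc
        exact Option.isSome_iff_exists.mp hc
      rw [PySem.Dict.get?_setdefault_self, hw]; rfl
    · exact PySem.Dict.get?_setdefault_of_ne r s hk

theorem rank_getD (l : List String) : ∀ (s : Int) (r : PySem.Dict String Int) (k : String),
    r.contains k = false → k ∈ l →
    ((PySem.List.enumerate l s).foldl (fun r p => r.setdefault p.2 p.1) r).getD k 0
      = s + (((PySem.List.index? l k).getD 0 : Nat) : Int) := by
  induction l with
  | nil => intro s r k _ hm; simp at hm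
  | cons a l ih =>
    intro s r k hc hm
    rw [PySem.List.enumerate_cons, List.foldl_cons]
    show ((PySem.List.enumerate l (s + 1)).foldl (fun r p => r.setdefault p.2 p.1)
      (r.setdefault a s)).getD k 0 = _
    by_cases hk : k = a
    · subst hk
      rw [PySem.Dict.setdefault_of_not_contains r s hc]
      have hcr : (r.insert k s).contains k = true := PySem.Dict.contains_insert_self r k s
      rw [PySem.Dict.getD_eq_get?_getD, rank_stable l (s + 1) _ k hcr,
        PySem.Dict.get?_insert_self, PySem.List.index?_cons_self]
      simp
    · have hm' : k ∈ l := (List.mem_cons.mp hm).resolve_left hk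
      have hc' : (r.setdefault a s).contains k = false := by
        rw [PySem.Dict.contains_setdefault]; simp [hk, hc]
      rw [ih (s + 1) _ k hc' hm', PySem.List.index?_cons_of_ne _ (fun he => hk he.symm)]
      obtain ⟨i, hi⟩ : ∃ i, PySem.List.index? l k = some i :=
        Option.isSome_iff_exists.mp ((PySem.List.index?_isSome_iff l k).mpr hm')
      rw [hi]
      simp
      omega

theorem traceKeys_eq_sorted (order : List String) (d : PySem.Dict String String)
    (hnd : d.keys.Nodup) :
    PySem.List.sorted (d.keys.filter (fun k => order.contains k))
      (fun k => ((PySem.List.enumerate order 0).foldl (fun r p => r.setdefault p.2 p.1)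
        (PySem.Dict.empty : PySem.Dict String Int)).getD k 0) false = traceKeys order d := by
  have h0 : ∀ x, d.contains x = true → x ∉ ([] : List String) := by simp
  obtain ⟨_, hpw⟩ := trace_idx_spec order [] d h0
  rw [List.nil_append] at hpw
  refine PySem.List.sorted_eq_of_perm_of_pairwise_lt _ _ _ ?_ ?_
  · refine (List.perm_ext_iff_of_nodup (nodup_traceKeys order d) (hnd.filter _)).mpr ?_
    intro x
    simp [mem_traceKeys_iff, List.mem_filter, PySem.Dict.contains_iff_mem_keys, and_comm]
  · refine List.Pairwise.imp_of_mem ?_ hpw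
    intro a b ha hb hlt
    obtain ⟨-, hao⟩ := mem_traceKeys order d a ha
    obtain ⟨-, hbo⟩ := mem_traceKeys order d b hb
    rw [rank_getD order 0 _ a (PySem.Dict.contains_empty a) hao,
      rank_getD order 0 _ b (PySem.Dict.contains_empty b) hbo]
    omega

theorem keys_eraseList (ks : List String) : ∀ (d : PySem.Dict String String),
    (eraseList d ks).keys = d.keys.filter (fun x => !(ks.contains x)) := by
  induction ks with
  | nil => intro d; simp [eraseList]
  | cons k ks ih =>
    intro d
    show (eraseList (d.erase k) ks).keys = _
    rw [ih (d.erase k), keys_erase, List.filter_filter]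
    refine List.filter_congr (fun x _ => ?_)
    simp only [List.contains_cons, Bool.not_or]
    by_cases hx : x = k <;> by_cases hm : x ∈ ks <;> simp [hx, hm]

theorem getD_eraseList_of_not_contains (ks : List String) :
    ∀ (d : PySem.Dict String String) (x v : String), ks.contains x = false →
    (eraseList d ks).getD x v = d.getD x v := by
  induction ks with
  | nil => intro d x v _; rfl
  | cons k ks ih =>
    intro d x v h
    simp only [List.contains_cons, Bool.or_eq_false_iff, beq_eq_false_iff_ne] at h
    show (eraseList (d.erase k) ks).getD x v = _
    rw [ih (d.erase k) x v (by simpa using h.2), getD_erase_of_ne d k x v h.1]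

theorem trace_self (ks : List String) : ∀ (d : PySem.Dict String String), ks.Nodup →
    (∀ k ∈ ks, d.contains k = true) → traceKeys ks d = ks := by
  induction ks with
  | nil => intro d _ _; rfl
  | cons k ks ih =>
    intro d hnd hall
    obtain ⟨hk, hnd'⟩ := List.nodup_cons.mp hnd
    cases hp : d.pop? k with
    | none =>
      have hck := hall k List.mem_cons_self
      rw [contains_false_of_pop_none d k hp] at hck
      simp at hck
    | some r =>
      obtain ⟨v, d'⟩ := r
      obtain ⟨hg, hd, _⟩ := pop?_some d k v d' hp
      have hall' : ∀ j ∈ ks, d'.contains j = true := by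
        intro j hj
        have hjk : j ≠ k := fun he => hk (he ▸ hj)
        rw [hd, contains_erase_of_ne d k j hjk]
        exact hall j (List.mem_cons_of_mem _ hj)
      rw [traceKeys, hp]
      show k :: traceKeys ks d' = k :: ks
      rw [ih d' hnd' hall']

-- ===== VERDICT (by name: the statement is the Claim_ definition above) =====
theorem generate_fname_spec : Claim_equal_generate_fname := by
  intro kwargs order _
  show generate_fname kwargs order = generate_fname_alt kwargs order
  unfold generate_fname generate_fname_alt
  simp only [foldl_stepA, List.nil_append]
  have hnd : (PySem.Dict.ofList kwargs).keys.Nodup := PySem.Dict.nodup_keys_ofList _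
  have hrc : ∀ k, ((PySem.List.enumerate order 0).foldl (fun r p => r.setdefault p.2 p.1)
      (PySem.Dict.empty : PySem.Dict String Int)).contains k = order.contains k := by
    intro k; rw [rank_contains]; simp
  rw [show (fun k => ((PySem.List.enumerate order 0).foldl (fun r p => r.setdefault p.2 p.1)
      (PySem.Dict.empty : PySem.Dict String Int)).contains k) = (fun k => order.contains k)
      from funext hrc,
    show (fun k => !((PySem.List.enumerate order 0).foldl (fun r p => r.setdefault p.2 p.1)
      (PySem.Dict.empty : PySem.Dict String Int)).contains k) = (fun k => !order.contains k)
      from funext fun k => by rw [hrc]]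
  rw [traceKeys_eq_sorted order _ hnd, List.map_append, keys_eraseList order]
  congr 1
  congr 1
  have hknd : (PySem.List.sorted
      (List.filter (fun x => !order.contains x) (PySem.Dict.ofList kwargs).keys)
      (fun k => k) false).Nodup :=
    (PySem.List.sorted_perm _ _ _).symm.nodup (hnd.filter _)
  have hmem : ∀ j ∈ PySem.List.sorted
      (List.filter (fun x => !order.contains x) (PySem.Dict.ofList kwargs).keys)
      (fun k => k) false,
      (eraseList (PySem.Dict.ofList kwargs) order).contains j = true := by
    intro j hj
    rw [PySem.List.mem_sorted] at hj
    rw [PySem.Dict.contains_iff_mem_keys, keys_eraseList order]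
    exact hj
  rw [trace_self _ _ hknd hmem]
  refine List.map_congr_left (fun j hj => ?_)
  rw [PySem.List.mem_sorted, List.mem_filter] at hj
  rw [getD_eraseList_of_not_contains order _ j "" (by simpa using hj.2)]
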